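-- pv_equiv track=rewrite | github.com/cmla-psu/ResidualPlannerPlus | experiments/HDMM_baseline/journal/compare_large_dataset.py | get_marginals_with_filter
-- ===== SOURCE A (Python) =====
-- import itertools
-- from functools import reduce
--
-- SIZE_LIMIT = 5000
--
-- def get_marginals_with_filter(domains, lower, upper, size_limit=SIZE_LIMIT):
--     """Return list of marginal tuples that pass the size filter."""
--     num_att = len(domains)
--     att = tuple(range(num_att))
--     marginals = []
--     for k in range(lower, upper):
--         for subset in itertools.combinations(att, k):
--             num_query = reduce(lambda x, y: x * y, [domains[c] for c in subset], 1)
--             if 0 < num_query < size_limit: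
--                 marginals.append(subset)
--     return marginals
-- ===== SOURCE B (Python) =====
-- SIZE_LIMIT = 5000
--
-- def get_marginals_with_filter(domains, lower, upper, size_limit=SIZE_LIMIT):
--     """Return list of marginal tuples that pass the size filter.
--
--     Recursive DFS enumerating index subsets in increasing order, threading the
--     running product of domain sizes instead of recomputing it per subset."""
--     n = len(domains)
--     out = []
--
--     def dfs(start, k, prod, prefix):
--         if k == 0:
--             if 0 < prod < size_limit:
--                 out.append(prefix)
--             return
--         for i in range(start, n - k + 1):
--             dfs(i + 1, k - 1, prod * domains[i], prefix + (i,))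
--
--     for k in range(lower, min(upper, n + 1)):
--         dfs(0, k, 1, ())
--     return out
-- ===== Notes on version B (the rewrite author's own statement) =====
-- stated objective: alternative
-- what changed: itertools.combinations + per-subset reduce is replaced by a recursive DFS over attribute indices that threads the running product (one multiplication per node) and caps the outer size loop at n+1 since larger subsets cannot exist.
import Mathlib
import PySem

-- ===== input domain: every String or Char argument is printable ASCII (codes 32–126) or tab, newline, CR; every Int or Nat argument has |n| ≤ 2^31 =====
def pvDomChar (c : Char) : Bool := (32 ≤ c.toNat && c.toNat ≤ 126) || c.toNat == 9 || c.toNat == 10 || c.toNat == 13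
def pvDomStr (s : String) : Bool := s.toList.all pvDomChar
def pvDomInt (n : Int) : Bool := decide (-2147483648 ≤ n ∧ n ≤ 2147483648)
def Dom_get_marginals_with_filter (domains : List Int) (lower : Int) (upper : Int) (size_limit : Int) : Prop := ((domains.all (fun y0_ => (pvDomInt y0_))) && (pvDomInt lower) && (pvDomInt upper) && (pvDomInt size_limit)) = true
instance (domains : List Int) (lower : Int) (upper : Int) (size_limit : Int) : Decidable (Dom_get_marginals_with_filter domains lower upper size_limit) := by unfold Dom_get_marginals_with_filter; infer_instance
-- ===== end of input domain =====

-- B replaces combinations + per-subset reduce by a recursive DFS threading the running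
-- product of domain sizes, capping the outer size loop at n+1 (alternative algorithm).

-- ===== PORT A =====
-- itertools.combinations(att, r) in lexicographic order (r ≥ 0; negative r is outside Pre_)
def combosA : Nat → List Int → List (List Int)
  | 0, _ => [[]]
  | _ + 1, [] => []
  | r + 1, x :: xs => (combosA r xs).map (fun s => x :: s) ++ combosA (r + 1) xs

def get_marginals_with_filter (domains : List Int) (lower : Int) (upper : Int) (size_limit : Int) : List (List Int) :=
  let num_att : Int := (domains.length : Int)
  let att : List Int := PySem.List.pyRange 0 num_att 1
  (PySem.List.pyRange lower upper 1).foldl (fun marginals k =>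
    (combosA k.toNat att).foldl (fun m subset =>
      let num_query := (subset.map (fun c => PySem.List.pyGetD domains c 0)).foldl (fun x y => x * y) 1
      if 0 < num_query ∧ num_query < size_limit then m ++ [subset] else m) marginals) []

-- ===== PORT B =====
-- dfs(start, k, prod, prefix) appending to out; out is threaded as an accumulator
def dfsB (domains : List Int) (size_limit : Int) (n : Nat) :
    Nat → Nat → Int → List Int → List (List Int) → List (List Int)
  | _, 0, prod, pre, out => if 0 < prod ∧ prod < size_limit then out ++ [pre] else out
  | start, k + 1, prod, pre, out =>
      (List.range' start ((n - k) - start)).foldl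
        (fun o i => dfsB domains size_limit n (i + 1) k
          (prod * PySem.List.pyGetD domains (i : Int) 0) (pre ++ [(i : Int)]) o) out
  termination_by _ k => k

def get_marginals_with_filter_alt (domains : List Int) (lower : Int) (upper : Int) (size_limit : Int) : List (List Int) :=
  let n := domains.length
  (PySem.List.pyRange lower (min upper ((n : Int) + 1)) 1).foldl
    (fun out k => dfsB domains size_limit n 0 k.toNat 1 [] out) []

-- ===== PRECONDITION & SPEC =====
-- Pre_ excludes only inputs where A raises: range(lower, upper) nonempty with a negative k
-- makes itertools.combinations raise ValueError ('r must be non-negative').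
def Pre_get_marginals_with_filter (domains : List Int) (lower : Int) (upper : Int) (size_limit : Int) : Prop :=
  0 ≤ lower ∨ upper ≤ lower
instance (domains : List Int) (lower : Int) (upper : Int) (size_limit : Int) : Decidable (Pre_get_marginals_with_filter domains lower upper size_limit) := by unfold Pre_get_marginals_with_filter; infer_instance

def pvWitness_get_marginals_with_filter : List Int × Int × Int × Int := ([2, 3, 4], 0, 3, 100)

def Spec_get_marginals_with_filter (domains : List Int) (lower : Int) (upper : Int) (size_limit : Int) (out : List (List Int)) : Prop := out = get_marginals_with_filter_alt domains lower upper size_limit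
instance (domains : List Int) (lower : Int) (upper : Int) (size_limit : Int) (out : List (List Int)) : Decidable (Spec_get_marginals_with_filter domains lower upper size_limit out) := by unfold Spec_get_marginals_with_filter; infer_instance

-- ===== CLAIM (what is proved, stated in full; the proofs are below) =====
def Claim_equal_get_marginals_with_filter : Prop := ∀ (domains : List Int) (lower : Int) (upper : Int) (size_limit : Int), Dom_get_marginals_with_filter domains lower upper size_limit → Pre_get_marginals_with_filter domains lower upper size_limit → Spec_get_marginals_with_filter domains lower upper size_limit (get_marginals_with_filter domains lower upper size_limit)

-- ===== LEMMAS AND PROOFS =====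

def prodQ (d : List Int) (s : List Int) : Int :=
  s.foldl (fun x c => x * PySem.List.pyGetD d c 0) 1

theorem foldl_mul_init (d : List Int) (s : List Int) (a : Int) :
    s.foldl (fun x c => x * PySem.List.pyGetD d c 0) a = a * prodQ d s := by
  induction s generalizing a with
  | nil => simp [prodQ]
  | cons c t ih =>
      simp only [List.foldl_cons, prodQ]
      rw [ih, ih]
      ring

theorem combosA_of_gt : ∀ (r : Nat) (l : List Int), l.length < r → combosA r l = [] := by
  intro r l
  induction l generalizing r with
  | nil => intro h; cases r with
      | zero => simp at h
      | succ r => rfl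
  | cons x xs ih =>
      intro h
      cases r with
      | zero => simp at h
      | succ r =>
          simp only [combosA]
          rw [ih r (by simpa using h), ih (r+1) (by simp at h ⊢; omega)]
          simp

theorem dfsB_eq (d : List Int) (sl : Int) (n : Nat) :
    ∀ (m k start : Nat) (prod : Int) (pre : List Int) (out : List (List Int)),
      start + m = n →
      dfsB d sl n start k prod pre out =
      (combosA k ((List.range' start m).map (fun j : Nat => (j : Int)))).foldl
        (fun o s => if 0 < prod * prodQ d s ∧ prod * prodQ d s < sl then o ++ [pre ++ s] else o) out := by
  intro m
  induction m with
  | zero =>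
      intro k start prod pre out h
      cases k with
      | zero => simp [dfsB, combosA, prodQ]
      | succ k =>
          have hc : (n - k) - start = 0 := by omega
          simp [dfsB, combosA, hc]
  | succ m ih =>
      intro k start prod pre out h
      cases k with
      | zero => simp [dfsB, combosA, prodQ]
      | succ k =>
          by_cases hk : m < k
          · -- k + 1 > m + 1 = length: both sides are `out`
            have hc : (n - k) - start = 0 := by omega
            rw [combosA_of_gt (k+1) _ (by simp [List.length_range']; omega)]
            simp [dfsB, hc]
          · have hkm : k ≤ m := by omega
            have hc : (n - k) - start = (m - k) + 1 := by omega
            have hrange : List.range' start ((n - k) - start) =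
                start :: List.range' (start+1) (m - k) := by
              rw [hc]; exact List.range'_succ ..
            have hrange2 : (n - k) - (start + 1) = m - k := by omega
            -- unfold one step of the B-side loop
            rw [dfsB, hrange]
            simp only [List.foldl_cons]
            -- the remaining fold is dfsB at start+1 with k+1
            have hrest : ∀ X, (List.range' (start+1) (m - k)).foldl
                  (fun o i => dfsB d sl n (i + 1) k
                    (prod * PySem.List.pyGetD d (i : Int) 0) (pre ++ [(i : Int)]) o) X =
                dfsB d sl n (start+1) (k+1) prod pre X := by
              intro X
              conv_rhs => rw [dfsB]
              rw [hrange2]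
            rw [hrest, ih (k+1) (start+1) prod pre _ (by omega),
                ih k (start+1) (prod * PySem.List.pyGetD d (start : Int) 0) (pre ++ [(start : Int)]) out (by omega)]
            -- RHS: unfold combosA on the cons'd range
            have hr : (List.range' start (m+1)).map (fun j : Nat => (j : Int)) =
                ((start : Int)) :: (List.range' (start+1) m).map (fun j : Nat => (j : Int)) := by
              rw [List.range'_succ]; simp
            rw [hr]
            simp only [combosA, List.foldl_append, List.foldl_map]
            congr 1
            apply PySem.List.foldl_congr_mem
            intro o s _
            have hq : prodQ d ((start : Int) :: s) = PySem.List.pyGetD d (start : Int) 0 * prodQ d s := by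
              unfold prodQ
              rw [List.foldl_cons, foldl_mul_init]
              unfold prodQ
              ring
            rw [hq]
            have : prod * (PySem.List.pyGetD d (start : Int) 0 * prodQ d s) =
                prod * PySem.List.pyGetD d (start : Int) 0 * prodQ d s := by ring
            rw [this]
            split
            · simp only [List.append_assoc, List.singleton_append]
            · rfl

theorem foldl_noop (g : List (List Int) → Int → List (List Int)) :
    ∀ (l : List Int) (acc : List (List Int)), (∀ a k, k ∈ l → g a k = a) → l.foldl g acc = acc := by
  intro l
  induction l with
  | nil => intro acc _; rfl
  | cons x xs ih =>
      intro acc h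
      simp only [List.foldl_cons]
      rw [h acc x (by simp), ih acc (fun a k hk => h a k (by simp [hk]))]

-- the per-k body of A equals the per-k body of B
theorem inner_eq (d : List Int) (sl : Int) (k : Int) (acc : List (List Int)) :
    dfsB d sl d.length 0 k.toNat 1 [] acc =
    (combosA k.toNat (PySem.List.pyRange 0 (d.length : Int) 1)).foldl (fun m subset =>
      let num_query := (subset.map (fun c => PySem.List.pyGetD d c 0)).foldl (fun x y => x * y) 1
      if 0 < num_query ∧ num_query < sl then m ++ [subset] else m) acc := by
  have hatt : PySem.List.pyRange 0 (d.length : Int) 1 =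
      (List.range' 0 d.length).map (fun j : Nat => (j : Int)) := by
    rw [PySem.List.pyRange_one]
    simp only [Int.sub_zero, Int.toNat_natCast, List.range_eq_range']
    apply List.map_congr_left
    intro a _
    simp
  rw [dfsB_eq d sl d.length d.length k.toNat 0 1 [] acc (by omega), hatt]
  apply PySem.List.foldl_congr_mem
  intro o s _
  have : (s.map (fun c => PySem.List.pyGetD d c 0)).foldl (fun x y => x * y) 1 = prodQ d s := by
    rw [List.foldl_map]; rfl
  simp [this]

-- ===== VERDICT (by name: the statement is the Claim_ definition above) =====
theorem get_marginals_with_filter_spec : Claim_equal_get_marginals_with_filter := by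
  intro d lower upper sl _ hpre
  unfold Spec_get_marginals_with_filter get_marginals_with_filter get_marginals_with_filter_alt
  simp only []
  set n : Nat := d.length with hn
  have hbody : ∀ (acc : List (List Int)) (k : Int),
      (combosA k.toNat (PySem.List.pyRange 0 (n : Int) 1)).foldl (fun m subset =>
        let num_query := (subset.map (fun c => PySem.List.pyGetD d c 0)).foldl (fun x y => x * y) 1
        if 0 < num_query ∧ num_query < sl then m ++ [subset] else m) acc =
      dfsB d sl n 0 k.toNat 1 [] acc := fun acc k => (inner_eq d sl k acc).symm
  have hnoop : ∀ (l : List Int), (∀ k ∈ l, (n : Int) < k) →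
      ∀ acc, l.foldl (fun out k => dfsB d sl n 0 k.toNat 1 [] out) acc = acc := by
    intro l hl acc
    apply foldl_noop
    intro a k hk
    have hkn : n < k.toNat := by have := hl k hk; omega
    rw [dfsB_eq d sl n n k.toNat 0 1 [] a (by omega),
        combosA_of_gt _ _ (by simp [List.length_range']; omega)]
    rfl
  calc (PySem.List.pyRange lower upper 1).foldl (fun marginals k =>
        (combosA k.toNat (PySem.List.pyRange 0 (n : Int) 1)).foldl (fun m subset =>
          let num_query := (subset.map (fun c => PySem.List.pyGetD d c 0)).foldl (fun x y => x * y) 1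
          if 0 < num_query ∧ num_query < sl then m ++ [subset] else m) marginals) []
      = (PySem.List.pyRange lower upper 1).foldl (fun out k => dfsB d sl n 0 k.toNat 1 [] out) [] := by
        apply PySem.List.foldl_congr_mem; intro acc k _; exact hbody acc k
    _ = (PySem.List.pyRange lower (min upper ((n : Int) + 1)) 1).foldl
          (fun out k => dfsB d sl n 0 k.toNat 1 [] out) [] := by
        by_cases hle : upper ≤ (n : Int) + 1
        · rw [min_eq_left hle]
        · rw [min_eq_right (by omega)]
          by_cases hl2 : lower ≤ (n : Int) + 1
          · rw [PySem.List.pyRange_one_append lower ((n : Int) + 1) upper hl2 (by omega),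
                List.foldl_append]
            apply hnoop
            intro k hk
            have := (PySem.List.mem_pyRange_one.mp hk).1
            omega
          · rw [show PySem.List.pyRange lower ((n : Int) + 1) 1 = [] from
                PySem.List.pyRange_one_eq_nil (by omega)]
            apply hnoop
            intro k hk
            have h1 := (PySem.List.mem_pyRange_one.mp hk).1
            omega
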